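-- pv_equiv track=rewrite | github.com/ZaneWarner/Algorithms-II | Clustering/MaxSpaceClustering2.py | generateDifferences
-- ===== SOURCE A (Python) =====
-- def generateDifferences(length, differences):
--     if differences == 0:
--         yield [0]*length
--     elif length == differences:
--         yield [1]*length
--     else:
--         for i in generateDifferences(length-1, differences):
--             yield [0] + i
--         for i in generateDifferences(length-1, differences-1):
--             yield [1] + i
-- ===== SOURCE B (Python) =====
-- def generateDifferences(length, differences):
--     # Enumerate the positions of the zeros instead of recursing on bits:
--     # ascending lexicographic combinations of zero-positions produce the
--     # same ascending order of vectors.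
--     def zero_sets(start, r):
--         if r == 0:
--             yield []
--         else:
--             for i in range(start, length - r + 1):
--                 for rest in zero_sets(i + 1, r - 1):
--                     yield [i] + rest
--     for zs in zero_sets(0, length - differences):
--         vec = [1] * length
--         for z in zs:
--             vec[z] = 0
--         yield vec
-- ===== Notes on version B (the rewrite author's own statement) =====
-- stated objective: alternative
-- what changed: A recurses on the leading bit, concatenating [0]+... and [1]+... sub-results; B instead enumerates the combinations of zero positions in ascending order and materialises each vector once from an all-ones list.
-- outside the precondition, e.g. on generateDifferences(-3, 0): A returns [[]], B raises RecursionError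
import Mathlib
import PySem

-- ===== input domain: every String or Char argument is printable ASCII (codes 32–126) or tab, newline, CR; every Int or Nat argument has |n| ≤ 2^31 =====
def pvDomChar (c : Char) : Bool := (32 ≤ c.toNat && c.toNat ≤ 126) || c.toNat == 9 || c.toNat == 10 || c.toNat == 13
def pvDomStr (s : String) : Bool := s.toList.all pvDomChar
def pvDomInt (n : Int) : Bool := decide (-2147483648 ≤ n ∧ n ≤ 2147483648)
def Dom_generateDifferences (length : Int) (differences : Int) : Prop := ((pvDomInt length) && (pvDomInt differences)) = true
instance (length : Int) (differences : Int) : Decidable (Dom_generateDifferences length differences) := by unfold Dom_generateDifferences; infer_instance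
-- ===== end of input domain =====

-- B replaces A's recursion on the leading bit by an enumeration of the zero-position
-- combinations (objective: alternative; same ascending output order, similar cost).
-- Both Pythons are generators; the ports return the list of yielded values.

-- ===== PORT A =====
-- fuel only makes A's recursion total; inside Pre_ the recursion depth is < length.toNat + 1
def genAux (fuel : Nat) (length differences : Int) : List (List Int) :=
  match fuel with
  | 0 => []
  | f + 1 =>
    if differences = 0 then [PySem.List.pyRepeat [0] length]
    else if length = differences then [PySem.List.pyRepeat [1] length]
    else (genAux f (length - 1) differences).map (fun i => [0] ++ i)
          ++ (genAux f (length - 1) (differences - 1)).map (fun i => [1] ++ i)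

def generateDifferences (length : Int) (differences : Int) : List (List Int) :=
  genAux (length.toNat + 1) length differences

-- ===== PORT B =====
-- zero_sets(start, r): combinations of r zero-positions from [start, length);
-- fuel only makes the recursion total (r decreases by 1 per level; fuel r.toNat is exact for r ≥ 0)
def zeroSets (length : Int) (fuel : Nat) (start r : Int) : List (List Int) :=
  if r = 0 then [[]]
  else match fuel with
    | 0 => []
    | f + 1 =>
      (PySem.List.pyRange start (length - r + 1) 1).flatMap
        (fun i => (zeroSets length f (i + 1) (r - 1)).map (fun rest => [i] ++ rest))

def generateDifferences_alt (length : Int) (differences : Int) : List (List Int) :=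
  (zeroSets length (length - differences).toNat 0 (length - differences)).map
    (fun zs => zs.foldl (fun vec z => PySem.List.pySetD vec z 0) (PySem.List.pyRepeat [1] length))

-- ===== PRECONDITION & SPEC =====
-- Pre_ excludes length < 0 with differences = 0 (A returns [[]] there — '[0]*length' is [] —
-- while B's zero-position enumeration never terminates) and the other inputs with
-- differences < 0 or differences > length, on which A's recursion is infinite (RecursionError).
def Pre_generateDifferences (length : Int) (differences : Int) : Prop :=
  (0 ≤ differences ∧ differences ≤ length) ∨ length = differences
instance (length : Int) (differences : Int) : Decidable (Pre_generateDifferences length differences) := by unfold Pre_generateDifferences; infer_instance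

def pvWitness_generateDifferences : Int × Int := (4, 2)

def Spec_generateDifferences (length : Int) (differences : Int) (out : List (List Int)) : Prop := out = generateDifferences_alt length differences
instance (length : Int) (differences : Int) (out : List (List Int)) : Decidable (Spec_generateDifferences length differences out) := by unfold Spec_generateDifferences; infer_instance

-- ===== CLAIM (what is proved, stated in full; the proofs are below) =====
def Claim_equal_generateDifferences : Prop := ∀ (length : Int) (differences : Int), Dom_generateDifferences length differences → Pre_generateDifferences length differences → Spec_generateDifferences length differences (generateDifferences length differences)

-- ===== LEMMAS AND PROOFS =====

-- vector built from a zero-position set (B's inner loop, with length already a Nat)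
def vecB (n : Nat) (zs : List Int) : List Int :=
  zs.foldl (fun vec z => PySem.List.pySetD vec z 0) (List.replicate n (1 : Int))

lemma pyRange_shift (a b : Int) :
    PySem.List.pyRange (a + 1) (b + 1) 1 = (PySem.List.pyRange a b 1).map (· + 1) := by
  rw [PySem.List.pyRange_one (a + 1) (b + 1), PySem.List.pyRange_one a b]
  have h : b + 1 - (a + 1) = b - a := by ring
  rw [h, List.map_map]
  refine List.map_congr_left (fun k _ => ?_)
  simp only [Function.comp_apply]
  ring

lemma pyRange_shift0 (b : Int) :
    PySem.List.pyRange 1 (b + 1) 1 = (PySem.List.pyRange 0 b 1).map (· + 1) := by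
  simpa using pyRange_shift 0 b

lemma zs_zero (L : Int) (f : Nat) (s : Int) : zeroSets L f s 0 = [[]] := by
  cases f <;> simp [zeroSets]

lemma zs_unfold (L : Int) (f : Nat) (s r : Int) (hr : r ≠ 0) :
    zeroSets L (f + 1) s r
      = (PySem.List.pyRange s (L - r + 1) 1).flatMap
          (fun i => (zeroSets L f (i + 1) (r - 1)).map (fun rest => [i] ++ rest)) := by
  simp [zeroSets, hr]

lemma zs_shift (L : Int) (f : Nat) : ∀ s r : Int,
    zeroSets (L + 1) f (s + 1) r = (zeroSets L f s r).map (List.map (· + 1)) := by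
  induction f with
  | zero =>
    intro s r
    rcases eq_or_ne r 0 with rfl | hr
    · simp [zs_zero]
    · simp [zeroSets, hr]
  | succ f ih =>
    intro s r
    rcases eq_or_ne r 0 with rfl | hr
    · simp [zs_zero]
    · rw [zs_unfold _ _ _ _ hr, zs_unfold _ _ _ _ hr,
        show L + 1 - r + 1 = (L - r + 1) + 1 by ring, pyRange_shift,
        List.flatMap_map, List.map_flatMap]
      congr 1
      funext i
      simp only [List.map_map]
      rw [ih (i + 1) (r - 1), List.map_map]
      refine List.map_congr_left (fun rest _ => ?_)
      simp [Function.comp]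

lemma zs_shift0 (L : Int) (f : Nat) (r : Int) :
    zeroSets (L + 1) f 1 r = (zeroSets L f 0 r).map (List.map (· + 1)) := by
  simpa using zs_shift L f 0 r

lemma zs_empty (L : Int) (f : Nat) (s r : Int) (hr : r ≠ 0) (h : L - r + 1 ≤ s) :
    zeroSets L (f + 1) s r = [] := by
  simp [zeroSets, hr, PySem.List.pyRange_one_eq_nil h]

lemma zs_split (n : Nat) (f : Nat) (r : Int) (h1 : 1 ≤ r) (h2 : r ≤ (n : Int) + 1) :
    zeroSets ((n : Int) + 1) (f + 1) 0 r =
      ((zeroSets (n : Int) f 0 (r - 1)).map (List.map (· + 1))).map (fun rest => [(0 : Int)] ++ rest)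
        ++ (zeroSets (n : Int) (f + 1) 0 r).map (List.map (· + 1)) := by
  have hr : r ≠ 0 := by omega
  rw [zs_unfold _ _ _ _ hr,
    show (n : Int) + 1 - r + 1 = ((n : Int) - r + 1) + 1 by ring,
    PySem.List.pyRange_one_cons (show (0 : Int) < ((n : Int) - r + 1) + 1 by omega),
    List.flatMap_cons]
  congr 1
  · simp only [zero_add]
    rw [zs_shift0]
  · simp only [zero_add]
    rw [pyRange_shift0, List.flatMap_map, zs_unfold _ _ _ _ hr, List.map_flatMap]
    congr 1
    funext i
    simp only [List.map_map]
    rw [zs_shift (n : Int) f (i + 1) (r - 1), List.map_map]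
    refine List.map_congr_left (fun rest _ => ?_)
    simp [Function.comp]

lemma zs_full (n : Nat) : ∀ f : Nat, n ≤ f →
    zeroSets (n : Int) f 0 (n : Int) = [PySem.List.pyRange 0 (n : Int) 1] := by
  induction n with
  | zero =>
    intro f _
    rw [Nat.cast_zero, zs_zero, PySem.List.pyRange_one_eq_nil (le_refl (0 : Int))]
  | succ n ih =>
    intro f hf
    obtain ⟨f', rfl⟩ : ∃ f', f = f' + 1 := ⟨f - 1, by omega⟩
    have hcast : ((n + 1 : Nat) : Int) = (n : Int) + 1 := by push_cast; ring
    rw [hcast, zs_split n f' ((n : Int) + 1) (by omega) (by omega),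
      zs_empty (n : Int) f' 0 ((n : Int) + 1) (by omega) (by omega),
      show (n : Int) + 1 - 1 = (n : Int) by ring, ih f' (by omega),
      PySem.List.pyRange_one_cons (show (0 : Int) < (n : Int) + 1 by omega),
      show (0 : Int) + 1 = 1 by norm_num, pyRange_shift0]
    simp

lemma zs_mem_nonneg (L : Int) (f : Nat) : ∀ s r : Int, ∀ zs ∈ zeroSets L f s r, ∀ z ∈ zs, s ≤ z := by
  induction f with
  | zero =>
    intro s r zs hzs z hz
    rcases eq_or_ne r 0 with rfl | hr
    · rw [zs_zero] at hzs; simp at hzs; subst hzs; simp at hz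
    · simp [zeroSets, hr] at hzs
  | succ f ih =>
    intro s r zs hzs z hz
    rcases eq_or_ne r 0 with rfl | hr
    · rw [zs_zero] at hzs; simp at hzs; subst hzs; simp at hz
    · rw [zs_unfold _ _ _ _ hr] at hzs
      simp only [List.mem_flatMap, List.mem_map] at hzs
      obtain ⟨i, hi, rest, hrest, rfl⟩ := hzs
      have his : s ≤ i := (PySem.List.mem_pyRange_one.1 hi).1
      rcases (by simpa using hz : z = i ∨ z ∈ rest) with rfl | h0
      · omega
      · have := ih (i + 1) (r - 1) rest hrest z h0
        omega

lemma vec_shift (zs : List Int) : (∀ z ∈ zs, 0 ≤ z) → ∀ (x : Int) (v : List Int),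
    (zs.map (· + 1)).foldl (fun vec z => PySem.List.pySetD vec z 0) (x :: v)
      = x :: zs.foldl (fun vec z => PySem.List.pySetD vec z 0) v := by
  induction zs with
  | nil => intro _ x v; rfl
  | cons z t ih =>
    intro h x v
    have hz : (0 : Int) ≤ z := h z (by simp)
    have hstep : PySem.List.pySetD (x :: v) (z + 1) 0 = x :: PySem.List.pySetD v z 0 := by
      rw [PySem.List.pySetD_of_nonneg _ _ (by omega : (0 : Int) ≤ z + 1),
        PySem.List.pySetD_of_nonneg _ _ hz,
        show (z + 1).toNat = z.toNat + 1 by omega, List.set_cons_succ]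
    simpa [hstep] using ih (fun y hy => h y (by simp [hy])) x (PySem.List.pySetD v z 0)

lemma vecB_cons_zero (n : Nat) (zs : List Int) (h : ∀ z ∈ zs, 0 ≤ z) :
    vecB (n + 1) ([0] ++ zs.map (· + 1)) = 0 :: vecB n zs := by
  unfold vecB
  rw [List.replicate_succ, List.singleton_append, List.foldl_cons]
  have h0 : PySem.List.pySetD (1 :: List.replicate n (1 : Int)) 0 0
      = 0 :: List.replicate n (1 : Int) := by
    rw [PySem.List.pySetD_of_nonneg _ _ (le_refl (0 : Int))]
    rfl
  rw [h0, vec_shift zs h 0 (List.replicate n (1 : Int))]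

lemma vecB_cons_one (n : Nat) (zs : List Int) (h : ∀ z ∈ zs, 0 ≤ z) :
    vecB (n + 1) (zs.map (· + 1)) = 1 :: vecB n zs := by
  unfold vecB
  rw [List.replicate_succ, vec_shift zs h 1 (List.replicate n (1 : Int))]

lemma vecB_full (n : Nat) :
    vecB n (PySem.List.pyRange 0 (n : Int) 1) = List.replicate n (0 : Int) := by
  induction n with
  | zero => simp [vecB, PySem.List.pyRange_one_eq_nil (le_refl (0 : Int))]
  | succ n ih =>
    have hcast : ((n + 1 : Nat) : Int) = (n : Int) + 1 := by push_cast; ring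
    have hsplit : PySem.List.pyRange 0 ((n : Int) + 1) 1
        = [0] ++ (PySem.List.pyRange 0 (n : Int) 1).map (· + 1) := by
      rw [PySem.List.pyRange_one_cons (show (0 : Int) < (n : Int) + 1 by omega),
        show (0 : Int) + 1 = 1 by norm_num, pyRange_shift0]
      rfl
    have hnn : ∀ z ∈ PySem.List.pyRange 0 (n : Int) 1, (0 : Int) ≤ z :=
      fun z hz => (PySem.List.mem_pyRange_one.1 hz).1
    rw [hcast, hsplit, vecB_cons_zero n _ hnn, ih, List.replicate_succ]

lemma main_equiv (n : Nat) : ∀ m : Nat, m ≤ n → ∀ f : Nat, n < f →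
    genAux f (n : Int) (m : Int)
      = (zeroSets (n : Int) (n - m) 0 ((n : Int) - (m : Int))).map (vecB n) := by
  induction n with
  | zero =>
    intro m hm f hf
    obtain rfl : m = 0 := by omega
    obtain ⟨f', rfl⟩ : ∃ f', f = f' + 1 := ⟨f - 1, by omega⟩
    norm_num [genAux, zs_zero, vecB, PySem.List.pyRepeat_singleton]
  | succ n ih =>
    intro m hm f hf
    obtain ⟨f', rfl⟩ : ∃ f', f = f' + 1 := ⟨f - 1, by omega⟩
    have hcast : ((n + 1 : Nat) : Int) = (n : Int) + 1 := by push_cast; ring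
    by_cases hm0 : m = 0
    · subst hm0
      rw [Nat.sub_zero, Nat.cast_zero, sub_zero, zs_full (n + 1) (n + 1) le_rfl]
      simp [genAux, PySem.List.pyRepeat_singleton]
      rw [← hcast, vecB_full]
    · by_cases hmn : m = n + 1
      · subst hmn
        rw [Nat.sub_self, sub_self, zs_zero]
        have hne : ((n : Int)) + 1 ≠ 0 := by omega
        simp [genAux, vecB, PySem.List.pyRepeat_singleton, hne]
      · -- 0 < m ≤ n
        have hmle : m ≤ n := by omega
        have h1m : (1 : Nat) ≤ m := by omega
        have hd0 : ((m : Nat) : Int) ≠ 0 := by omega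
        have hld : ((n + 1 : Nat) : Int) ≠ ((m : Nat) : Int) := by push_cast; omega
        rw [show genAux (f' + 1) ((n + 1 : Nat) : Int) ((m : Nat) : Int)
            = (genAux f' (((n + 1 : Nat) : Int) - 1) ((m : Nat) : Int)).map (fun i => [0] ++ i)
              ++ (genAux f' (((n + 1 : Nat) : Int) - 1) (((m : Nat) : Int) - 1)).map
                  (fun i => [1] ++ i) by
            simp [genAux, hm0, show ¬((n : Int) + 1 = (m : Int)) by omega],
          show ((n + 1 : Nat) : Int) - 1 = (n : Int) by push_cast; ring,
          show ((m : Nat) : Int) - 1 = ((m - 1 : Nat) : Int) by push_cast [h1m]; ring,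
          ih m hmle f' (by omega), ih (m - 1) (by omega) f' (by omega),
          show n - (m - 1) = (n - m) + 1 by omega,
          show ((n : Int)) - ((m - 1 : Nat) : Int) = (n : Int) + 1 - (m : Int) by
            push_cast [h1m]; ring,
          hcast, show (n + 1) - m = (n - m) + 1 by omega,
          zs_split n (n - m) ((n : Int) + 1 - (m : Int)) (by omega) (by omega),
          show (n : Int) + 1 - (m : Int) - 1 = (n : Int) - (m : Int) by ring,
          List.map_append]
        congr 1
        · rw [List.map_map, List.map_map, List.map_map]
          refine List.map_congr_left (fun zs hzs => ?_)
          have hnn : ∀ z ∈ zs, (0 : Int) ≤ z := zs_mem_nonneg (n : Int) (n - m) 0 _ zs hzs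
          simp only [Function.comp_apply]
          rw [vecB_cons_zero n zs hnn]
          rfl
        · rw [List.map_map, List.map_map]
          refine List.map_congr_left (fun zs hzs => ?_)
          have hnn : ∀ z ∈ zs, (0 : Int) ≤ z :=
            zs_mem_nonneg (n : Int) ((n - m) + 1) 0 _ zs hzs
          simp only [Function.comp_apply]
          rw [vecB_cons_one n zs hnn]
          rfl

-- ===== VERDICT (by name: the statement is the Claim_ definition above) =====
theorem generateDifferences_spec : Claim_equal_generateDifferences := by
  intro length differences _ hpre
  unfold Spec_generateDifferences
  rcases hpre with ⟨hd, hdl⟩ | heq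
  · -- 0 ≤ differences ≤ length
    have hl0 : (0 : Int) ≤ length := le_trans hd hdl
    set n := length.toNat with hn
    set m := differences.toNat with hm
    have hL : (n : Int) = length := Int.toNat_of_nonneg hl0
    have hM : (m : Int) = differences := Int.toNat_of_nonneg hd
    have hmn : m ≤ n := by omega
    have htn : ((n : Int) - (m : Int)).toNat = n - m := by omega
    have hfix : ((n : Int)).toNat = n := by omega
    unfold generateDifferences generateDifferences_alt
    rw [← hL, ← hM, htn, hfix, main_equiv n m hmn (n + 1) (by omega)]
    refine List.map_congr_left (fun zs _ => ?_)
    unfold vecB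
    rw [PySem.List.pyRepeat_singleton, hfix]
  · -- length = differences (includes negative equal pairs: both return [[1]*length])
    subst heq
    unfold generateDifferences generateDifferences_alt
    rw [sub_self]
    by_cases h0 : length = 0
    · subst h0
      simp [genAux, zs_zero, PySem.List.pyRepeat_singleton]
    · simp [genAux, h0, zs_zero, Int.toNat_zero]
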